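-- pv_equiv track=rewrite | github.com/JackingChen/Vowel-Space-Characteristics | Try_Context_dependant_phone_multithread.py | Vowel_ADOSCode_Combinator
-- ===== SOURCE A (Python) =====
-- def Vowel_ADOSCode_Combinator(vowel_dict,feat,ui_type='merged',label_choose_lst=['ADOS_C']):
--     '''
--         ui_type= 'jw' or 'iu' or 'merged '
--         feat= 'CtxDepVowel_AUI' or 'LeftDepVowel_AUI' or 'RightDepVowel_AUI'
--
--     '''
--     listA, listu, listi=[], [], []
--     for ctx_P in vowel_dict.keys():
--         feat_type=feat[:feat.find("Dep")]
--
--         if feat_type == 'Ctx':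
--             critical_P=ctx_P[ctx_P.find('-')+1:ctx_P.find('+')]
--         elif feat_type == 'Left':
--             critical_P=ctx_P[ctx_P.find('-')+1:]
--         elif feat_type == 'Right':
--             critical_P=ctx_P[:ctx_P.find('+')]
--
--         if ui_type == 'merged' or ui_type == 'iu': # if ui_type is merged, in the previous function will treat w as u and j as i
--             if critical_P == 'u':
--                 listu.append(ctx_P)
--             if critical_P == 'A':
--                 listA.append(ctx_P)
--             if critical_P == 'i':
--                 listi.append(ctx_P)
--         elif ui_type == 'jw':
--             if critical_P == 'w':
--                 listu.append(ctx_P)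
--             if critical_P == 'A':
--                 listA.append(ctx_P)
--             if critical_P == 'j':
--                 listi.append(ctx_P)
--
--     DepAUI_combs=[listA,listu,listi,label_choose_lst]
--     return DepAUI_combs
-- ===== SOURCE B (Python) =====
-- def Vowel_ADOSCode_Combinator(vowel_dict, feat, ui_type='merged', label_choose_lst=['ADOS_C']):
--     # Different decomposition: resolve the ui_type -> key triple up front, group every
--     # context-phone under its critical phone in one dict pass, then select the three lists.
--     selections = {'merged': ('A', 'u', 'i'), 'iu': ('A', 'u', 'i'), 'jw': ('A', 'w', 'j')}
--     sel = selections.get(ui_type)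
--     if sel is None:
--         return [[], [], [], label_choose_lst]
--     feat_type = feat[:feat.find("Dep")]
--     groups = {}
--     for ctx_P in vowel_dict.keys():
--         if feat_type == 'Ctx':
--             critical_P = ctx_P[ctx_P.find('-')+1:ctx_P.find('+')]
--         elif feat_type == 'Left':
--             critical_P = ctx_P[ctx_P.find('-')+1:]
--         elif feat_type == 'Right':
--             critical_P = ctx_P[:ctx_P.find('+')]
--         else:
--             raise ValueError("unknown feat type: " + feat_type)
--         groups.setdefault(critical_P, []).append(ctx_P)
--     ka, ku, ki = sel
--     return [groups.get(ka, []), groups.get(ku, []), groups.get(ki, []), label_choose_lst]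
-- ===== Notes on version B (the rewrite author's own statement) =====
-- stated objective: simpler
-- what changed: B resolves ui_type to a key triple up front via a selection table (returning early when it selects nothing), groups every context phone under its critical phone in one dict pass with no per-value branching, and picks the three output lists from the groups afterwards; A instead branches on ui_type and on the critical phone inside the loop, appending into three separate accumulator lists.
import Mathlib
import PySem

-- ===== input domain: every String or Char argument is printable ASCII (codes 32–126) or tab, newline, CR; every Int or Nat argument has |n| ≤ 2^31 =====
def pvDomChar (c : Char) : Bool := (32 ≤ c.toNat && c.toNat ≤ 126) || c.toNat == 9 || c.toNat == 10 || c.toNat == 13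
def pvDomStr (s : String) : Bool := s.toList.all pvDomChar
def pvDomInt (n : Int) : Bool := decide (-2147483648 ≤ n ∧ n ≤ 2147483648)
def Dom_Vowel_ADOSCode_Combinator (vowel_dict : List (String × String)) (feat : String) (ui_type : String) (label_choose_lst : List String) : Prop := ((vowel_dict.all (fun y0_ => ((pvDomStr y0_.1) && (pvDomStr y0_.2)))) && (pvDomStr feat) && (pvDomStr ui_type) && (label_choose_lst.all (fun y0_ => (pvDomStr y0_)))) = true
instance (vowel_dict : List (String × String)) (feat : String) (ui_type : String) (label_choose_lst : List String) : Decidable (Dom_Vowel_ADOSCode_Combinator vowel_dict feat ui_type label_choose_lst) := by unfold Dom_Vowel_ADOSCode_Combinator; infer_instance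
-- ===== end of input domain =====

-- B groups the context phones by critical phone in one dict pass and selects the three
-- output lists afterwards (objective: simpler decomposition; same one-pass cost as A).

-- ===== PORT A =====
-- A's loop body, verbatim: per key compute feat_type and critical_P, then append into
-- one of three accumulator lists via per-value branches.  critical_P? is Option-valued:
-- `none` is Python's unbound `critical_P` (A raises UnboundLocalError when it is then
-- read; exactly those inputs are excluded by Pre_; when ui_type selects no branch the
-- variable is never read and A returns normally).
def pvStepA (feat ui_type : String) (st : List String × List String × List String)
    (kv : String × String) : List String × List String × List String :=
  let ctx_P := kv.1
  let feat_type := PySem.Str.slice feat none (some (PySem.Str.find feat "Dep"))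
  let critical_P? : Option String :=
    if feat_type = "Ctx" then
      some (PySem.Str.slice ctx_P (some (PySem.Str.find ctx_P "-" + 1)) (some (PySem.Str.find ctx_P "+")))
    else if feat_type = "Left" then
      some (PySem.Str.slice ctx_P (some (PySem.Str.find ctx_P "-" + 1)) none)
    else if feat_type = "Right" then
      some (PySem.Str.slice ctx_P none (some (PySem.Str.find ctx_P "+")))
    else none
  if ui_type = "merged" ∨ ui_type = "iu" then
    let st := if critical_P? = some "u" then (st.1, st.2.1 ++ [ctx_P], st.2.2) else st
    let st := if critical_P? = some "A" then (st.1 ++ [ctx_P], st.2.1, st.2.2) else st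
    if critical_P? = some "i" then (st.1, st.2.1, st.2.2 ++ [ctx_P]) else st
  else if ui_type = "jw" then
    let st := if critical_P? = some "w" then (st.1, st.2.1 ++ [ctx_P], st.2.2) else st
    let st := if critical_P? = some "A" then (st.1 ++ [ctx_P], st.2.1, st.2.2) else st
    if critical_P? = some "j" then (st.1, st.2.1, st.2.2 ++ [ctx_P]) else st
  else st

def Vowel_ADOSCode_Combinator (vowel_dict : List (String × String)) (feat : String) (ui_type : String) (label_choose_lst : List String) : List (List String) :=
  let st := vowel_dict.foldl (pvStepA feat ui_type) ([], [], [])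
  [st.1, st.2.1, st.2.2, label_choose_lst]

-- ===== PORT B =====
-- critical phone of a context key given the feat type; `none` = Source B's `raise ValueError`
-- (reachable only outside Pre_, where nothing is claimed).
def pvCritP (feat_type : String) (ctx_P : String) : Option String :=
  if feat_type = "Ctx" then
    some (PySem.Str.slice ctx_P (some (PySem.Str.find ctx_P "-" + 1)) (some (PySem.Str.find ctx_P "+")))
  else if feat_type = "Left" then
    some (PySem.Str.slice ctx_P (some (PySem.Str.find ctx_P "-" + 1)) none)
  else if feat_type = "Right" then
    some (PySem.Str.slice ctx_P none (some (PySem.Str.find ctx_P "+")))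
  else none

def Vowel_ADOSCode_Combinator_alt (vowel_dict : List (String × String)) (feat : String) (ui_type : String) (label_choose_lst : List String) : List (List String) :=
  let selections : PySem.Dict String (String × String × String) :=
    PySem.Dict.ofList [("merged", ("A", "u", "i")), ("iu", ("A", "u", "i")), ("jw", ("A", "w", "j"))]
  match selections.get? ui_type with
  | none => [[], [], [], label_choose_lst]
  | some (ka, ku, ki) =>
    let feat_type := PySem.Str.slice feat none (some (PySem.Str.find feat "Dep"))
    let groups : PySem.Dict String (List String) := vowel_dict.foldl (fun g kv =>
      match pvCritP feat_type kv.1 with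
      | some c => g.modify c [] (fun l => l ++ [kv.1])   -- groups.setdefault(c, []).append(ctx_P)
      | none => g) PySem.Dict.empty
    [groups.getD ka [], groups.getD ku [], groups.getD ki [], label_choose_lst]

-- ===== PRECONDITION & SPEC =====
-- Pre_ excludes exactly the inputs on which A raises UnboundLocalError (non-empty dict,
-- a selecting ui_type, and a feat whose prefix before "Dep" is none of Ctx/Left/Right);
-- B raises ValueError on the same inputs, so nothing is carved out where A returns.
def Pre_Vowel_ADOSCode_Combinator (vowel_dict : List (String × String)) (feat : String) (ui_type : String) (label_choose_lst : List String) : Prop :=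
  vowel_dict = [] ∨ ¬ (ui_type = "merged" ∨ ui_type = "iu" ∨ ui_type = "jw") ∨
    (PySem.Str.slice feat none (some (PySem.Str.find feat "Dep")) = "Ctx" ∨
     PySem.Str.slice feat none (some (PySem.Str.find feat "Dep")) = "Left" ∨
     PySem.Str.slice feat none (some (PySem.Str.find feat "Dep")) = "Right")
instance (vowel_dict : List (String × String)) (feat : String) (ui_type : String) (label_choose_lst : List String) : Decidable (Pre_Vowel_ADOSCode_Combinator vowel_dict feat ui_type label_choose_lst) := by unfold Pre_Vowel_ADOSCode_Combinator; infer_instance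

def pvWitness_Vowel_ADOSCode_Combinator : (List (String × String)) × String × String × List String :=
  ([("A-u+b", "x"), ("b-A+c", "y"), ("c-i+d", "z")], "CtxDepVowel_AUI", "merged", ["ADOS_C"])

def Spec_Vowel_ADOSCode_Combinator (vowel_dict : List (String × String)) (feat : String) (ui_type : String) (label_choose_lst : List String) (out : List (List String)) : Prop := out = Vowel_ADOSCode_Combinator_alt vowel_dict feat ui_type label_choose_lst
instance (vowel_dict : List (String × String)) (feat : String) (ui_type : String) (label_choose_lst : List String) (out : List (List String)) : Decidable (Spec_Vowel_ADOSCode_Combinator vowel_dict feat ui_type label_choose_lst out) := by unfold Spec_Vowel_ADOSCode_Combinator; infer_instance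

-- ===== CLAIM (what is proved, stated in full; the proofs are below) =====
def Claim_equal_Vowel_ADOSCode_Combinator : Prop := ∀ (vowel_dict : List (String × String)) (feat : String) (ui_type : String) (label_choose_lst : List String), Dom_Vowel_ADOSCode_Combinator vowel_dict feat ui_type label_choose_lst → Pre_Vowel_ADOSCode_Combinator vowel_dict feat ui_type label_choose_lst → Spec_Vowel_ADOSCode_Combinator vowel_dict feat ui_type label_choose_lst (Vowel_ADOSCode_Combinator vowel_dict feat ui_type label_choose_lst)

-- ===== LEMMAS AND PROOFS =====

-- A's loop with three distinct target phones: each accumulator list collects, in order,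
-- the keys whose critical phone is its target.
theorem pvFoldA_spec (f : String → Option String) (ka ku ki : String)
    (hau : ka ≠ ku) (hai : ka ≠ ki) (hui : ku ≠ ki) (l : List (String × String))
    (a u i : List String) :
    l.foldl (fun (st : List String × List String × List String) kv =>
      let st := if f kv.1 = some ku then (st.1, st.2.1 ++ [kv.1], st.2.2) else st
      let st := if f kv.1 = some ka then (st.1 ++ [kv.1], st.2.1, st.2.2) else st
      if f kv.1 = some ki then (st.1, st.2.1, st.2.2 ++ [kv.1]) else st) (a, u, i)
    = (a ++ (l.filter (fun kv => f kv.1 = some ka)).map (·.1),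
       u ++ (l.filter (fun kv => f kv.1 = some ku)).map (·.1),
       i ++ (l.filter (fun kv => f kv.1 = some ki)).map (·.1)) := by
  induction l generalizing a u i with
  | nil => simp
  | cons hd tl ih =>
    simp only [List.foldl_cons, List.filter_cons]
    cases hf : f hd.1 with
    | none => simp [ih]
    | some c =>
      by_cases h1 : c = ku
      · subst h1; simp [Ne.symm hau, hui, ih]
      · by_cases h2 : c = ka
        · subst h2; simp [h1, hai, ih]
        · by_cases h3 : c = ki
          · subst h3; simp [h1, h2, ih]
          · simp [h1, h2, h3, ih]

-- B's grouping dict: looking up any phone yields exactly the matching keys, in order.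
theorem pvFoldB_getD (f : String → Option String) (l : List (String × String))
    (g : PySem.Dict String (List String)) (k : String) :
    (l.foldl (fun g kv =>
        match f kv.1 with
        | some c => g.modify c [] (fun l => l ++ [kv.1])
        | none => g) g).getD k []
    = g.getD k [] ++ (l.filter (fun kv => f kv.1 = some k)).map (·.1) := by
  induction l generalizing g with
  | nil => simp
  | cons hd tl ih =>
    simp only [List.foldl_cons, List.filter_cons]
    cases hf : f hd.1 with
    | none => simp [ih]
    | some c =>
      by_cases hc : c = k
      · subst hc; simp [PySem.Dict.getD_modify_self, ih]
      · simp [PySem.Dict.getD_modify, Ne.symm hc, hc, ih]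

-- A's step when ui_type selects the merged/iu branch is the generic three-bucket step.
theorem pvStepA_sel (feat ui_type : String) (hm : ui_type = "merged" ∨ ui_type = "iu") :
    pvStepA feat ui_type = (fun (st : List String × List String × List String) kv =>
      let st := if pvCritP (PySem.Str.slice feat none (some (PySem.Str.find feat "Dep"))) kv.1 = some "u" then (st.1, st.2.1 ++ [kv.1], st.2.2) else st
      let st := if pvCritP (PySem.Str.slice feat none (some (PySem.Str.find feat "Dep"))) kv.1 = some "A" then (st.1 ++ [kv.1], st.2.1, st.2.2) else st
      if pvCritP (PySem.Str.slice feat none (some (PySem.Str.find feat "Dep"))) kv.1 = some "i" then (st.1, st.2.1, st.2.2 ++ [kv.1]) else st) := by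
  funext st kv
  simp only [pvStepA, if_pos hm]
  rfl

-- A's step for ui_type = "jw".
theorem pvStepA_jw (feat : String) :
    pvStepA feat "jw" = (fun (st : List String × List String × List String) kv =>
      let st := if pvCritP (PySem.Str.slice feat none (some (PySem.Str.find feat "Dep"))) kv.1 = some "w" then (st.1, st.2.1 ++ [kv.1], st.2.2) else st
      let st := if pvCritP (PySem.Str.slice feat none (some (PySem.Str.find feat "Dep"))) kv.1 = some "A" then (st.1 ++ [kv.1], st.2.1, st.2.2) else st
      if pvCritP (PySem.Str.slice feat none (some (PySem.Str.find feat "Dep"))) kv.1 = some "j" then (st.1, st.2.1, st.2.2 ++ [kv.1]) else st) := by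
  funext st kv
  simp only [pvStepA, if_neg (by decide : ¬ ("jw" = "merged" ∨ "jw" = "iu"))]
  rfl

-- A's step when ui_type selects no branch leaves the state unchanged.
theorem pvStepA_other (feat ui_type : String) (h1 : ¬ (ui_type = "merged" ∨ ui_type = "iu"))
    (h2 : ¬ ui_type = "jw") :
    pvStepA feat ui_type = (fun st _ => st) := by
  funext st kv
  simp only [pvStepA, if_neg h1, if_neg h2]

-- the selection table of B, evaluated at the three selecting keys and elsewhere
theorem pvSel_none (ui_type : String) (h1 : ¬ ui_type = "merged") (h2 : ¬ ui_type = "iu")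
    (h3 : ¬ ui_type = "jw") :
    (PySem.Dict.ofList [("merged", ("A", "u", "i")), ("iu", ("A", "u", "i")), ("jw", ("A", "w", "j"))]).get? ui_type
      = (none : Option (String × String × String)) := by
  have h : (PySem.Dict.ofList [("merged", ("A", "u", "i")), ("iu", ("A", "u", "i")), ("jw", ("A", "w", "j"))])
      = ((PySem.Dict.empty.insert "merged" ("A", "u", "i")).insert "iu" ("A", "u", "i")).insert "jw" ("A", "w", "j") := rfl
  rw [h, PySem.Dict.get?_insert, PySem.Dict.get?_insert, PySem.Dict.get?_insert]
  simp [h1, h2, h3]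

-- ===== VERDICT (by name: the statement is the Claim_ definition above) =====
theorem Vowel_ADOSCode_Combinator_spec : Claim_equal_Vowel_ADOSCode_Combinator := by
  intro vd feat ui lab _ _
  unfold Spec_Vowel_ADOSCode_Combinator Vowel_ADOSCode_Combinator Vowel_ADOSCode_Combinator_alt
  by_cases hm : ui = "merged" ∨ ui = "iu"
  · have hsel : (PySem.Dict.ofList [("merged", ("A", "u", "i")), ("iu", ("A", "u", "i")), ("jw", ("A", "w", "j"))]).get? ui
        = some ("A", "u", "i") := by rcases hm with h | h <;> subst h <;> rfl
    simp only [hsel, pvStepA_sel feat ui hm]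
    rw [pvFoldA_spec _ "A" "u" "i" (by decide) (by decide) (by decide)]
    simp only [pvFoldB_getD, List.nil_append, PySem.Dict.getD_empty]
  · by_cases hj : ui = "jw"
    · subst hj
      have hsel : (PySem.Dict.ofList [("merged", ("A", "u", "i")), ("iu", ("A", "u", "i")), ("jw", ("A", "w", "j"))]).get? "jw"
          = some ("A", "w", "j") := rfl
      simp only [hsel, pvStepA_jw feat]
      rw [pvFoldA_spec _ "A" "w" "j" (by decide) (by decide) (by decide)]
      simp only [pvFoldB_getD, List.nil_append, PySem.Dict.getD_empty]
    · have h1 : ¬ ui = "merged" := fun h => hm (Or.inl h)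
      have h2 : ¬ ui = "iu" := fun h => hm (Or.inr h)
      simp only [pvSel_none ui h1 h2 hj, pvStepA_other feat ui hm hj]
      simp [List.foldl_fixed]
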